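-- pv_equiv track=rewrite | github.com/iwootten/adventofcode | 2020/day6.py | line_count
-- ===== SOURCE A (Python) =====
-- def line_count(group):
--     questions = set(group.replace("\n", ""))
--
--     return sum(
--         [
--             all(question in group for group in group.splitlines())
--             for question in questions
--         ]
--     )
-- ===== SOURCE B (Python) =====
-- def line_count(group):
--     lines = group.splitlines()
--     if not lines:
--         return 0
--     common = set(lines[0])
--     for line in lines[1:]:
--         common &= set(line)
--     return len(common)
-- ===== Notes on version B (the rewrite author's own statement) =====
-- stated objective: simpler
-- what changed: Instead of scanning every line once per distinct character of the whole group, B builds one character set per line and intersects them in a single pass, returning the intersection's size (0 for an empty group).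
import Mathlib
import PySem

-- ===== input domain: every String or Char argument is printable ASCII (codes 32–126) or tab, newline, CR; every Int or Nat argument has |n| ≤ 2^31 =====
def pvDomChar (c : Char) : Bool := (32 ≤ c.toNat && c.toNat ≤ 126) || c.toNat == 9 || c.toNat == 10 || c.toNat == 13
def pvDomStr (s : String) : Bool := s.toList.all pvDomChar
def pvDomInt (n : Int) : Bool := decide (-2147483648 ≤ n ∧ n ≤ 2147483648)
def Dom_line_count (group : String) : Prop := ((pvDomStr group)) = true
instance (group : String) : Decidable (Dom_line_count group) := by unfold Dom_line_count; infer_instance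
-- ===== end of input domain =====

-- B replaces A's per-distinct-character rescan of all lines by one pass that
-- intersects per-line character sets (objective: simpler); return values agree on all inputs.

-- ===== PORT A =====
def line_count (group : String) : Int :=
  let questions : PySem.Set Char := PySem.Set.ofList (PySem.Chars.replace group.toList ['\n'] [])
  (questions.map (fun question =>
      if (PySem.Chars.splitlines group.toList).all (fun line => PySem.Chars.isIn [question] line)
      then (1 : Int) else 0)).sum

-- ===== PORT B =====
def line_count_alt (group : String) : Int :=
  match PySem.Chars.splitlines group.toList with
  | [] => 0
  | l0 :: rest =>
    PySem.Set.len
      (rest.foldl (fun common line => PySem.Set.inter common (PySem.Set.ofList line))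
        (PySem.Set.ofList l0))

-- ===== PRECONDITION & SPEC =====
def Spec_line_count (group : String) (out : Int) : Prop := out = line_count_alt group
instance (group : String) (out : Int) : Decidable (Spec_line_count group out) := by unfold Spec_line_count; infer_instance

-- ===== CLAIM (what is proved, stated in full; the proofs are below) =====
def Claim_equal_line_count : Prop := ∀ (group : String), Dom_line_count group → Spec_line_count group (line_count group)

-- ===== LEMMAS AND PROOFS =====

-- str.replace(s, "\n", "") removes exactly the newline characters
theorem replace_go_newline (fuel : Nat) (l acc : List Char) (h : l.length ≤ fuel) :
    PySem.Chars.replace.go ['\n'] [] fuel l acc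
      = acc.reverse ++ l.filter (fun c => c ≠ '\n') := by
  induction l generalizing fuel acc with
  | nil =>
    cases fuel <;> simp [PySem.Chars.replace.go]
  | cons c t ih =>
    cases fuel with
    | zero => simp at h
    | succ fuel =>
      by_cases hc : c = '\n'
      · subst hc
        rw [PySem.Chars.replace.go]
        simp only [List.isPrefixOf, beq_self_eq_true, Bool.true_and]
        simp [ih fuel acc (by simpa using h)]
      · rw [PySem.Chars.replace.go]
        have hpre : List.isPrefixOf ['\n'] (c :: t) = false := by
          simp [List.isPrefixOf]
          exact fun hx => absurd hx.symm hc
        simp only [hpre]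
        rw [ih fuel (c :: acc) (by simpa using Nat.le_of_succ_le_succ h)]
        simp [List.filter_cons]
        exact hc

theorem replace_newline (l : List Char) :
    PySem.Chars.replace l ['\n'] [] = l.filter (fun c => c ≠ '\n') := by
  simp [PySem.Chars.replace, replace_go_newline l.length l [] le_rfl]

-- any character of any produced line comes from the pending line, the accumulator, or is a non-break char of the input
theorem splitlines_go_sub (isB : Char → Bool) (l cur : List Char) (acc : List (List Char)) :
    ∀ line ∈ PySem.Chars.splitlines.go isB l cur acc, ∀ c ∈ line,
      c ∈ cur ∨ (∃ li ∈ acc, c ∈ li) ∨ (c ∈ l ∧ isB c = false) := by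
  induction l, cur, acc using PySem.Chars.splitlines.go.induct isB with
  | case1 cur acc hcur =>
    intro line hline c hc
    rw [PySem.Chars.splitlines.go] at hline
    simp [hcur] at hline
    exact Or.inr (Or.inl ⟨line, hline, hc⟩)
  | case2 cur acc hcur =>
    intro line hline c hc
    rw [PySem.Chars.splitlines.go] at hline
    simp [hcur] at hline
    rcases hline with h | h
    · exact Or.inr (Or.inl ⟨line, h, hc⟩)
    · exact Or.inl (by simpa [h] using hc)
  | case3 rest cur acc ih =>
    intro line hline c hc
    rw [PySem.Chars.splitlines.go] at hline
    rcases ih line hline c hc with h | ⟨li, hli, hcli⟩ | ⟨h1, h2⟩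
    · simp at h
    · rcases List.mem_cons.mp hli with h | h
      · exact Or.inl (by simpa [h] using hcli)
      · exact Or.inr (Or.inl ⟨li, h, hcli⟩)
    · exact Or.inr (Or.inr ⟨by simp [h1], h2⟩)
  | case4 c' rest cur acc hne hB ih =>
    intro line hline c hc
    rw [PySem.Chars.splitlines.go] at hline
    · have hline' : line ∈ PySem.Chars.splitlines.go isB rest [] (cur.reverse :: acc) := by
        simpa [hB] using hline
      rcases ih line hline' c hc with h | ⟨li, hli, hcli⟩ | ⟨h1, h2⟩
      · simp at h
      · rcases List.mem_cons.mp hli with h | h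
        · exact Or.inl (by simpa [h] using hcli)
        · exact Or.inr (Or.inl ⟨li, h, hcli⟩)
      · exact Or.inr (Or.inr ⟨by simp [h1], h2⟩)
    · exact hne
  | case5 c' rest cur acc hne hB ih =>
    intro line hline c hc
    rw [PySem.Chars.splitlines.go] at hline
    · have hline' : line ∈ PySem.Chars.splitlines.go isB rest (c' :: cur) acc := by
        simpa [hB] using hline
      rcases ih line hline' c hc with h | ⟨li, hli, hcli⟩ | ⟨h1, h2⟩
      · rcases List.mem_cons.mp h with h | h
        · exact Or.inr (Or.inr ⟨by simp [h], by simpa [h] using hB⟩)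
        · exact Or.inl h
      · exact Or.inr (Or.inl ⟨li, hli, hcli⟩)
      · exact Or.inr (Or.inr ⟨by simp [h1], h2⟩)
    · exact hne

theorem splitlines_go_eq_nil (isB : Char → Bool) (l cur : List Char) (acc : List (List Char)) :
    PySem.Chars.splitlines.go isB l cur acc = [] → l = [] ∧ cur = [] ∧ acc = [] := by
  induction l, cur, acc using PySem.Chars.splitlines.go.induct isB with
  | case1 cur acc hcur =>
    intro h
    rw [PySem.Chars.splitlines.go] at h
    simp [hcur] at h
    exact ⟨rfl, List.isEmpty_iff.mp hcur, h⟩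
  | case2 cur acc hcur =>
    intro h
    rw [PySem.Chars.splitlines.go] at h
    simp [hcur] at h
  | case3 rest cur acc ih =>
    intro h
    rw [PySem.Chars.splitlines.go] at h
    exact absurd (ih h).2.2 (by simp)
  | case4 c' rest cur acc hne hB ih =>
    intro h
    rw [PySem.Chars.splitlines.go] at h
    · have h' : PySem.Chars.splitlines.go isB rest [] (cur.reverse :: acc) = [] := by
        simpa [hB] using h
      exact absurd (ih h').2.2 (by simp)
    · exact hne
  | case5 c' rest cur acc hne hB ih =>
    intro h
    rw [PySem.Chars.splitlines.go] at h
    · have h' : PySem.Chars.splitlines.go isB rest (c' :: cur) acc = [] := by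
        simpa [hB] using h
      exact absurd (ih h').2.1 (by simp)
    · exact hne

-- membership in the running intersection
theorem mem_foldl_inter (rest : List (List Char)) (s : PySem.Set Char) (c : Char) :
    (c ∈ rest.foldl (fun common line => PySem.Set.inter common (PySem.Set.ofList line)) s)
      ↔ (c ∈ s ∧ ∀ line ∈ rest, c ∈ line) := by
  induction rest generalizing s with
  | nil => simp
  | cons l t ih =>
    rw [List.foldl_cons, ih]
    constructor
    · rintro ⟨hin, h3⟩
      rw [PySem.Set.mem_inter] at hin
      refine ⟨hin.1, fun line hl => ?_⟩
      rcases List.mem_cons.mp hl with rfl | hl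
      · exact (PySem.Set.mem_ofList _ _).mp hin.2
      · exact h3 line hl
    · rintro ⟨h1, h2⟩
      exact ⟨(PySem.Set.mem_inter _ _ _).mpr
          ⟨h1, (PySem.Set.mem_ofList _ _).mpr (h2 l List.mem_cons_self)⟩,
        fun line hl => h2 line (List.mem_cons_of_mem _ hl)⟩

theorem nodup_foldl_inter (rest : List (List Char)) (s : PySem.Set Char) (hs : s.Nodup) :
    (rest.foldl (fun common line => PySem.Set.inter common (PySem.Set.ofList line)) s).Nodup := by
  induction rest generalizing s with
  | nil => exact hs
  | cons l t ih => exact ih _ (PySem.Set.nodup_inter _ _ hs)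

-- ===== VERDICT (by name: the statement is the Claim_ definition above) =====
theorem line_count_spec : Claim_equal_line_count := by
  intro group _
  unfold Spec_line_count line_count line_count_alt
  simp only [replace_newline]
  have hisIn : ∀ (q : Char) (line : List Char),
      PySem.Chars.isIn [q] line = decide (q ∈ line) := by
    intro q line
    by_cases h : q ∈ line
    · simp [h, (PySem.Chars.isIn_iff_infix [q] line).mpr ((List.singleton_infix_iff q line).mpr h)]
    · simp only [h, decide_false]
      by_contra hh
      exact h ((List.singleton_infix_iff q line).mp
        ((PySem.Chars.isIn_iff_infix [q] line).mp (by revert hh; cases PySem.Chars.isIn [q] line <;> simp)))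
  set L := PySem.Chars.splitlines group.toList with hL
  set S : PySem.Set Char :=
    PySem.Set.ofList (group.toList.filter (fun c => c ≠ '\n')) with hS
  have hA : (S.map (fun question =>
      if L.all (fun line => PySem.Chars.isIn [question] line) then (1 : Int) else 0)).sum
      = (S.countP (fun q => L.all (fun line => decide (q ∈ line))) : Int) := by
    rw [PySem.List.sum_map_ite_one_zero]
    congr 1
    apply List.countP_congr
    intro q _
    simp [hisIn]
  rw [hA]
  cases hcase : L with
  | nil =>
    have hg : group.toList = [] := (splitlines_go_eq_nil _ _ _ _ (by simpa [PySem.Chars.splitlines] using hcase)).1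
    simp [hS, hg]
  | cons l0 rest =>
    rw [List.countP_eq_length_filter]
    set P : Char → Bool := fun q => (l0 :: rest).all (fun line => decide (q ∈ line)) with hP
    have hmem : ∀ c : Char, c ∈ S.filter P ↔
        c ∈ rest.foldl (fun common line => PySem.Set.inter common (PySem.Set.ofList line))
          (PySem.Set.ofList l0) := by
      intro c
      rw [mem_foldl_inter, List.mem_filter]
      constructor
      · rintro ⟨_, hp⟩
        simp only [hP, List.all_eq_true, decide_eq_true_eq, List.mem_cons] at hp
        exact ⟨(PySem.Set.mem_ofList l0 c).mpr (hp l0 (Or.inl rfl)),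
          fun line hl => hp line (Or.inr hl)⟩
      · rintro ⟨h0, hrest⟩
        have h0' : c ∈ l0 := (PySem.Set.mem_ofList l0 c).mp h0
        have hsub := splitlines_go_sub _ group.toList [] [] l0
          (by rw [show PySem.Chars.splitlines.go _ group.toList [] [] = L from rfl, hcase]; exact List.mem_cons_self) c h0'
        rcases hsub with h | ⟨li, hli, _⟩ | ⟨hcg, hB⟩
        · simp at h
        · simp at hli
        · refine ⟨?_, ?_⟩
          · rw [hS, PySem.Set.mem_ofList, List.mem_filter]
            refine ⟨hcg, ?_⟩
            simp only [decide_eq_true_eq] at hB ⊢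
            intro hcn; subst hcn; simp at hB
          · simp only [hP, List.all_eq_true, decide_eq_true_eq, List.mem_cons]
            rintro line (rfl | hl)
            · exact h0'
            · exact hrest line hl
    have hperm : (S.filter P).Perm
        (rest.foldl (fun common line => PySem.Set.inter common (PySem.Set.ofList line))
          (PySem.Set.ofList l0)) :=
      (List.perm_ext_iff_of_nodup ((PySem.Set.nodup_ofList _).filter _)
        (nodup_foldl_inter _ _ (PySem.Set.nodup_ofList _))).mpr hmem
    simp [PySem.Set.len, hperm.length_eq]
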